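-- pv_equiv track=rewrite | github.com/PWbio/Bioinformatics-Algorithms | BA_Design_and_Implementation_in_Python/Chapter code/5_2.py | search_first_pattern
-- ===== SOURCE A (Python) =====
-- def search_first_pattern(seq, pattern):
--     """Return the offset position of the first pattern found."""
--     found = False
--     i = 0
--     while i <= len(seq) - len(pattern) and not found:
--         # i specify starting position in input seq to match with pattern.
--         j = 0
--         while j < len(pattern) and pattern[j] == seq[i + j]:
--             # j define the position of the pattern.
--             # 'While' loop will match seq and pattern one by one.
--             j = j + 1
--         if j == len(pattern):
--             # If seq and pattern are identical, j == len (pattern).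
--             # Otherwise, j < len(pattern).
--             found = True
--         else:
--             i += 1
--     if found:
--         return i
--     else:
--         return -1
-- ===== SOURCE B (Python) =====
-- def search_first_pattern(seq, pattern):
--     """Return the offset position of the first pattern found."""
--     return seq.find(pattern)
-- ===== Notes on version B (the rewrite author's own statement) =====
-- stated objective: idiomatic
-- what changed: Replaced A's hand-written nested while-loop scan with a single call to the built-in str.find, which has identical semantics (first offset, -1 if absent, 0 for the empty pattern) and runs in optimized C.
import Mathlib
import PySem

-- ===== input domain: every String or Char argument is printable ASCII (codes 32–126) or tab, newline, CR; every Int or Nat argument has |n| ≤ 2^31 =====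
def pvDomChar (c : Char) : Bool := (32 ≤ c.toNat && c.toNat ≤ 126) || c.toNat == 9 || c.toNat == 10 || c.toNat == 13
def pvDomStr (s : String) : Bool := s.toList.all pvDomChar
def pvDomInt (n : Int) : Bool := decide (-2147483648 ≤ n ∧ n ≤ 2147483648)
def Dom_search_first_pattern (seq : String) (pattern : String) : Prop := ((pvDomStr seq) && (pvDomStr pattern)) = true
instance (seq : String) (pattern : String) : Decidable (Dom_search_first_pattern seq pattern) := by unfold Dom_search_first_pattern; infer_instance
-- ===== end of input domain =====

-- B replaces A's hand-written quadratic scan by the built-in str.find (same result, C-level speed).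


-- ===== PORT A =====
-- inner while loop: j advances while j < len(pattern) and pattern[j] == seq[i+j]
def sfpInner (s p : List Char) (i j : Nat) : Nat :=
  if h : j < p.length ∧ PySem.List.pyGet? p (j : Int) = PySem.List.pyGet? s ((i + j : Nat) : Int) then
    sfpInner s p i (j + 1)
  else j
termination_by p.length - j
decreasing_by omega

-- outer while loop: i advances while i <= len(seq) - len(pattern) and not found
def sfpOuter (s p : List Char) (i : Nat) : Int :=
  if h : (i : Int) ≤ PySem.List.len s - PySem.List.len p then
    let j := sfpInner s p i 0
    if j = p.length then (i : Int) else sfpOuter s p (i + 1)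
  else -1
termination_by s.length + 1 - i
decreasing_by simp [PySem.List.len_eq] at h; omega

def search_first_pattern (seq : String) (pattern : String) : Int :=
  sfpOuter seq.toList pattern.toList 0

-- ===== PORT B =====
def search_first_pattern_alt (seq : String) (pattern : String) : Int :=
  PySem.Str.find seq pattern

-- ===== PRECONDITION & SPEC =====
def Spec_search_first_pattern (seq : String) (pattern : String) (out : Int) : Prop := out = search_first_pattern_alt seq pattern
instance (seq : String) (pattern : String) (out : Int) : Decidable (Spec_search_first_pattern seq pattern out) := by unfold Spec_search_first_pattern; infer_instance

-- ===== CLAIM (what is proved, stated in full; the proofs are below) =====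
def Claim_equal_search_first_pattern : Prop := ∀ (seq : String) (pattern : String), Dom_search_first_pattern seq pattern → Spec_search_first_pattern seq pattern (search_first_pattern seq pattern)

-- ===== LEMMAS AND PROOFS =====

-- full match in the inner loop → the pattern matches character by character from offset i
theorem sfpInner_eq_len_imp (s p : List Char) (i : Nat) :
    ∀ n j, p.length - j ≤ n → sfpInner s p i j = p.length →
      ∀ k, j ≤ k → k < p.length → p[k]? = s[i + k]? := by
  intro n
  induction n with
  | zero =>
    intro j hn _ k hjk hk; omega
  | succ n ih =>
    intro j hn hrun k hjk hk
    unfold sfpInner at hrun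
    split_ifs at hrun with h
    · rcases h with ⟨hjlt, heq⟩
      simp only [PySem.List.pyGet?_natCast] at heq
      rcases Nat.eq_or_lt_of_le hjk with rfl | hlt
      · exact heq
      · exact ih (j + 1) (by omega) hrun k hlt hk
    · omega

-- character-by-character match from offset i → the inner loop runs to len(pattern)
theorem sfpInner_of_match (s p : List Char) (i : Nat) :
    ∀ n j, p.length - j ≤ n → j ≤ p.length → (∀ k, j ≤ k → k < p.length → p[k]? = s[i + k]?) →
      sfpInner s p i j = p.length := by
  intro n
  induction n with
  | zero =>
    intro j hn hj _
    unfold sfpInner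
    rw [dif_neg (by omega)]; omega
  | succ n ih =>
    intro j hn hj hmatch
    unfold sfpInner
    split_ifs with h
    · exact ih (j + 1) (by omega) (by omega) (fun k hk1 hk2 => hmatch k (by omega) hk2)
    · rcases Nat.eq_or_lt_of_le hj with rfl | hlt
      · rfl
      · refine absurd ⟨hlt, ?_⟩ h
        simp only [PySem.List.pyGet?_natCast]
        exact hmatch j le_rfl hlt

-- prefix-at-offset characterisation
theorem prefix_drop_iff (s p : List Char) (i : Nat) :
    p <+: s.drop i ↔ ∀ k, k < p.length → p[k]? = s[i + k]? := by
  rw [List.prefix_iff_getElem?]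
  constructor
  · intro hpre k hk
    rw [List.getElem?_eq_getElem hk, ← List.getElem?_drop, hpre k hk]
  · intro hmatch k hk
    rw [List.getElem?_drop, ← hmatch k hk, List.getElem?_eq_getElem hk]

theorem sfpOuter_eq_find_aux (s p : List Char) :
    ∀ n i, s.length + 1 - i ≤ n → (∀ k, k < i → ¬ p <+: s.drop k) →
      sfpOuter s p i = PySem.Chars.find s p := by
  intro n
  induction n with
  | zero =>
    intro i hn hno
    have hi : s.length < i := by omega
    unfold sfpOuter
    rw [dif_neg (by simp [PySem.List.len_eq]; omega)]
    symm
    rw [PySem.Chars.find_eq_neg_one_iff]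
    intro hinf
    rcases (PySem.Chars.exists_prefix_drop_iff_isIn p s).2
      ((PySem.Chars.isIn_iff_infix p s).2 hinf) with ⟨k, hk⟩
    by_cases hks : k ≤ s.length
    · exact hno k (by omega) hk
    · have hnil : List.drop k s = [] := List.drop_eq_nil_of_le (by omega)
      rw [hnil, List.prefix_nil] at hk
      exact hno 0 (by omega) (by simp [hk])
  | succ n ih =>
    intro i hn hno
    unfold sfpOuter
    by_cases h : (i : Int) ≤ PySem.List.len s - PySem.List.len p
    · rw [dif_pos h]
      have hguard : i + p.length ≤ s.length := by
        simp only [PySem.List.len_eq] at h; omega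
      show (if sfpInner s p i 0 = p.length then (i : Int) else sfpOuter s p (i + 1)) =
        PySem.Chars.find s p
      by_cases hm : sfpInner s p i 0 = p.length
      · -- inner loop matched: i is the first occurrence
        rw [if_pos hm]
        have hpre : p <+: s.drop i :=
          (prefix_drop_iff s p i).2
            (fun k hk => sfpInner_eq_len_imp s p i p.length 0 (by omega) hm k (by omega) hk)
        have hf0 : 0 ≤ PySem.Chars.find s p := by
          rw [PySem.Chars.find_nonneg_iff]
          exact (PySem.Chars.isIn_iff_infix p s).1
            ((PySem.Chars.exists_prefix_drop_iff_isIn p s).1 ⟨i, hpre⟩)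
        obtain ⟨hfpre, hfmin⟩ := PySem.Chars.find_spec hf0
        have hieq : (PySem.Chars.find s p).toNat = i := by
          rcases Nat.lt_trichotomy (PySem.Chars.find s p).toNat i with hlt | heq | hgt
          · exact absurd hfpre (hno _ hlt)
          · exact heq
          · exact absurd hpre (hfmin i hgt)
        omega
      · -- no match at i: recurse with the extended no-occurrence invariant
        rw [if_neg hm]
        apply ih (i + 1) (by omega)
        intro k hk
        rcases Nat.lt_or_ge k i with hlt | hge
        · exact hno k hlt
        · have hki : k = i := by omega
          subst hki
          intro hpre
          exact hm (sfpInner_of_match s p k p.length 0 (by omega) (by omega)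
            (fun m _ hmlt => (prefix_drop_iff s p k).1 hpre m hmlt))
    · -- guard false: no room for the pattern at any offset ≥ i, and none before i
      rw [dif_neg h]
      have hbig : s.length < i + p.length := by
        simp only [PySem.List.len_eq] at h; omega
      symm
      rw [PySem.Chars.find_eq_neg_one_iff]
      intro hinf
      rcases (PySem.Chars.exists_prefix_drop_iff_isIn p s).2
        ((PySem.Chars.isIn_iff_infix p s).2 hinf) with ⟨k, hk⟩
      by_cases hks : k ≤ s.length
      · have hklen : p.length ≤ s.length - k := by simpa using hk.length_le
        exact hno k (by omega) hk
      · have hnil : List.drop k s = [] := List.drop_eq_nil_of_le (by omega)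
        rw [hnil, List.prefix_nil] at hk
        have hi0 : 0 < i := by
          subst hk; simp at hbig; omega
        exact hno 0 hi0 (by simp [hk])

theorem sfpOuter_eq_find (s p : List Char) :
    ∀ i, (∀ k, k < i → ¬ p <+: s.drop k) → sfpOuter s p i = PySem.Chars.find s p := by
  intro i
  exact sfpOuter_eq_find_aux s p (s.length + 1 - i) i le_rfl

-- ===== VERDICT (by name: the statement is the Claim_ definition above) =====
theorem search_first_pattern_spec : Claim_equal_search_first_pattern := by
  intro seq pattern _
  unfold Spec_search_first_pattern search_first_pattern search_first_pattern_alt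
  rw [PySem.Str.find_eq]
  exact sfpOuter_eq_find _ _ 0 (fun k hk => absurd hk (by omega))
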